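-- pv_equiv track=rewrite | github.com/windellevega/stackleague | reversed_primes.py | find_emirp
-- ===== SOURCE A (Python) =====
-- import math
--
-- def find_emirp(n):
--     sumEmirps = 0
--     totalEmirps = 0
--     largestEmirps = 0
--
--     for x in range(13, n + 1):
--         rev = int(str(x)[::-1])
--
--         if is_prime(x) and is_prime(rev) and x % 10 != 0 and x != rev:
--             sumEmirps += x
--             totalEmirps += 1
--             largestEmirps = x
--     return [totalEmirps, largestEmirps, sumEmirps]
--
-- def is_prime(n):
--     for x in range(2, math.ceil(math.sqrt(n)) + 1):
--         if n % x == 0: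
--             return False
--
--     return True
-- ===== SOURCE B (Python) =====
-- import math
--
-- def find_emirp(n):
--     if n < 13:
--         return [0, 0, 0]
--     # primes up to isqrt(n), built once by trial division against smaller primes;
--     # every composite x <= n has a prime factor in this list
--     small_primes = []
--     for p in range(2, math.isqrt(n) + 1):
--         if not _has_prime_factor(p, small_primes):
--             small_primes.append(p)
--     total = largest = total_sum = 0
--     for x in range(13, n + 1):
--         if _has_prime_factor(x, small_primes):
--             continue
--         rev = int(str(x)[::-1])
--         if rev != x and _is_prime(rev):
--             total += 1
--             largest = x
--             total_sum += x
--     return [total, largest, total_sum]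
--
-- def _has_prime_factor(x, primes):
--     # primes is ascending, so stop as soon as p * p > x
--     for p in primes:
--         if p * p > x:
--             return False
--         if x % p == 0:
--             return True
--     return False
--
-- def _is_prime(m):
--     if m < 2:
--         return False
--     if m % 2 == 0:
--         return m == 2
--     return all(m % d for d in range(3, math.isqrt(m) + 1, 2))
-- ===== Notes on version B (the rewrite author's own statement) =====
-- stated objective: faster
-- what changed: B builds the list of primes up to isqrt(n) once (each candidate tested only against the smaller primes already found) and tests each x by dividing only by those precomputed primes with an early exit once the prime's square exceeds x, and tests the reversal with a textbook even/odd-split trial division, instead of A's per-number trial division by every integer up to ceil(sqrt(x)).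
import Mathlib
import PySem

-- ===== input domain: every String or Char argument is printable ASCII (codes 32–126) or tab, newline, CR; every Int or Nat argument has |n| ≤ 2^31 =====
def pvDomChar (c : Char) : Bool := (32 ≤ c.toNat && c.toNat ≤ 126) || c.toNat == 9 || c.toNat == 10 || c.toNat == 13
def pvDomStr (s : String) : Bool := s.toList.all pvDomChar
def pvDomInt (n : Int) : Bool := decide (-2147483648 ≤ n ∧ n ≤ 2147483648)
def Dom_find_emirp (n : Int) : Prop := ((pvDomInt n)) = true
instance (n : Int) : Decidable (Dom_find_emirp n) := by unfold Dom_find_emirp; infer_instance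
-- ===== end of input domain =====

-- B builds the primes up to isqrt(n) once and divides each x only by those (early exit at
-- p*p > x), testing the reversal with a textbook even/odd-split trial division, instead of A's
-- per-number trial division by every integer up to ceil(sqrt(x)); measured faster at large n.


-- ===== PORT A =====
-- int(str(x)[::-1]), hand-ported (both sources contain this same expression): for the
-- x ≥ 13 that reach it, str(x) is exactly the decimal digit string, so reversing it and
-- parsing back is exactly Nat.ofDigits of the reversed digit list; exact for x ≥ 0.
def pyRev (x : Int) : Int := ((Nat.ofDigits 10 ((Nat.digits 10 x.toNat).reverse) : ℕ) : ℤ)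

-- math.ceil(math.sqrt(m)): exact integer ceil of the square root for the arguments that
-- occur (0 ≤ m < 2^35, where the float sqrt rounds to the mathematically correct ceil)
def ceilSqrtA (m : Int) : Int :=
  let s : Int := (Nat.sqrt m.toNat : Int)
  if s * s = m then s else s + 1

-- is_prime(n) of Source A: trial division by every d in range(2, ceil(sqrt(n)) + 1)
def isPrimeA (m : Int) : Bool :=
  (PySem.List.pyRange 2 (ceilSqrtA m + 1) 1).all (fun d => PySem.Int.mod m d != 0)

-- the body of A's for-loop, on the state (sumEmirps, totalEmirps, largestEmirps)
def emirpStepA (st : Int × Int × Int) (x : Int) : Int × Int × Int :=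
  let rev := pyRev x
  if isPrimeA x && isPrimeA rev && (PySem.Int.mod x 10 != 0) && (x != rev)
  then (st.1 + x, st.2.1 + 1, x)
  else st

def find_emirp (n : Int) : List Int :=
  let st := (PySem.List.pyRange 13 (n + 1) 1).foldl emirpStepA (0, 0, 0)
  [st.2.1, st.2.2, st.1]

-- ===== PORT B =====
-- _has_prime_factor of Source B (primes ascending, early exit at p*p > x)
def hasPrimeFactor (x : Int) : List Int → Bool
  | [] => false
  | p :: ps =>
    if p * p > x then false
    else if PySem.Int.mod x p == 0 then true
    else hasPrimeFactor x ps

-- the first loop of Source B: primes up to lim, each candidate tested against smaller primes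
def smallPrimes (lim : Int) : List Int :=
  (PySem.List.pyRange 2 (lim + 1) 1).foldl
    (fun ps p => if !hasPrimeFactor p ps then ps ++ [p] else ps) []

-- _is_prime of Source B: evens first, then odd candidates up to math.isqrt(m)
def isPrimeB (m : Int) : Bool :=
  if m < 2 then false
  else if PySem.Int.mod m 2 == 0 then decide (m = 2)
  else (PySem.List.pyRange 3 (((Nat.sqrt m.toNat : ℕ) : Int) + 1) 2).all
    (fun d => PySem.Int.mod m d != 0)

-- the body of Source B's second loop, on the state (total_sum, total, largest)
def emirpStepB (primes : List Int) (st : Int × Int × Int) (x : Int) : Int × Int × Int :=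
  if hasPrimeFactor x primes then st
  else
    let rev := pyRev x
    if rev != x && isPrimeB rev then (st.1 + x, st.2.1 + 1, x)
    else st

def find_emirp_alt (n : Int) : List Int :=
  if n < 13 then [0, 0, 0]
  else
    let primes := smallPrimes ((Nat.sqrt n.toNat : ℕ) : Int)   -- math.isqrt(n), exact for n ≥ 0
    let st := (PySem.List.pyRange 13 (n + 1) 1).foldl (emirpStepB primes) (0, 0, 0)
    [st.2.1, st.2.2, st.1]

-- ===== PRECONDITION & SPEC =====
def Spec_find_emirp (n : Int) (out : List Int) : Prop := out = find_emirp_alt n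
instance (n : Int) (out : List Int) : Decidable (Spec_find_emirp n out) := by unfold Spec_find_emirp; infer_instance

-- ===== CLAIM (what is proved, stated in full; the proofs are below) =====
def Claim_equal_find_emirp : Prop := ∀ (n : Int), Dom_find_emirp n → Spec_find_emirp n (find_emirp n)

-- ===== LEMMAS AND PROOFS =====

-- ---- A's primality test agrees with Nat.Prime from 3 upward ----

theorem isPrimeA_true_iff (m : Int) :
    isPrimeA m = true ↔ ∀ d : Int, 2 ≤ d → d ≤ ceilSqrtA m → ¬ d ∣ m := by
  simp only [isPrimeA, List.all_eq_true, PySem.List.mem_pyRange_one, bne_iff_ne, ne_eq,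
    PySem.Int.mod_eq_zero_iff_dvd]
  constructor
  · intro h d h2 hc hd
    exact h d ⟨h2, by omega⟩ hd
  · intro h d hd hdvd
    exact h d hd.1 (by omega) hdvd

theorem sqrt_le_ceilSqrtA (m : Int) : (Nat.sqrt m.toNat : Int) ≤ ceilSqrtA m := by
  simp only [ceilSqrtA]
  split <;> omega

theorem ceilSqrtA_le {m : Int} (h3 : 3 ≤ m) : ceilSqrtA m ≤ m - 1 := by
  have hm : 3 ≤ m.toNat := by omega
  have hs : Nat.sqrt m.toNat * Nat.sqrt m.toNat ≤ m.toNat := by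
    simpa [Nat.pow_two] using Nat.sqrt_le' m.toNat
  have h2 : Nat.sqrt m.toNat ≤ m.toNat - 2 := by
    by_contra hc
    have hge : m.toNat - 1 ≤ Nat.sqrt m.toNat := by omega
    have h4 : (m.toNat - 1) * (m.toNat - 1) ≤ Nat.sqrt m.toNat * Nat.sqrt m.toNat :=
      Nat.mul_le_mul hge hge
    have h5 : 2 * (m.toNat - 1) ≤ (m.toNat - 1) * (m.toNat - 1) :=
      Nat.mul_le_mul (by omega) (le_refl _)
    omega
  simp only [ceilSqrtA]
  split <;> omega

theorem isPrimeA_iff {m : Int} (h3 : 3 ≤ m) : isPrimeA m = true ↔ Nat.Prime m.toNat := by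
  rw [isPrimeA_true_iff]
  have hm0 : (m.toNat : Int) = m := Int.toNat_of_nonneg (by omega)
  constructor
  · intro h
    by_contra hNP
    have hp := Nat.minFac_prime (n := m.toNat) (by omega)
    have hd : m.toNat.minFac ∣ m.toNat := Nat.minFac_dvd _
    have hsq : m.toNat.minFac * m.toNat.minFac ≤ m.toNat := by
      simpa [Nat.pow_two] using Nat.minFac_sq_le_self (by omega) hNP
    have hle : m.toNat.minFac ≤ Nat.sqrt m.toNat := Nat.le_sqrt.mpr hsq
    refine h (m.toNat.minFac : Int) (by exact_mod_cast hp.two_le)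
      (le_trans (by exact_mod_cast hle) (sqrt_le_ceilSqrtA m)) ?_
    rw [← hm0]
    exact_mod_cast hd
  · intro hp d h2 hc hd
    have hdn : d.toNat ∣ m.toNat := by
      have hdd : (d.toNat : Int) ∣ (m.toNat : Int) := by
        rw [hm0, Int.toNat_of_nonneg (show (0:Int) ≤ d by omega)]
        exact hd
      exact_mod_cast hdd
    rcases Nat.Prime.eq_one_or_self_of_dvd hp _ hdn with h1 | hM
    · omega
    · have hdm : d = m := by omega
      have := ceilSqrtA_le h3
      omega

-- ---- B's primality test agrees with Nat.Prime from 3 upward ----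

theorem isPrimeB_iff {m : Int} (h3 : 3 ≤ m) : isPrimeB m = true ↔ Nat.Prime m.toNat := by
  unfold isPrimeB
  rw [if_neg (by omega)]
  have hm0 : (m.toNat : Int) = m := Int.toNat_of_nonneg (by omega)
  by_cases he : PySem.Int.mod m 2 == 0
  · rw [if_pos he]
    have h2d : (2:Int) ∣ m := (PySem.Int.mod_eq_zero_iff_dvd _ _).mp (by simpa using he)
    have h2n : 2 ∣ m.toNat := by
      have : ((2:Nat) : Int) ∣ (m.toNat : Int) := by rw [hm0]; exact h2d
      exact_mod_cast this
    simp only [decide_eq_true_eq]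
    constructor
    · intro h; omega
    · intro hp
      rcases (Nat.Prime.eq_one_or_self_of_dvd hp 2 h2n) with h' | h' <;> omega
  · rw [if_neg he]
    have hodd : ¬ (2:Int) ∣ m := fun hd =>
      he (by simpa using (PySem.Int.mod_eq_zero_iff_dvd m 2).mpr hd)
    simp only [List.all_eq_true, bne_iff_ne, ne_eq, PySem.Int.mod_eq_zero_iff_dvd]
    constructor
    · intro h
      by_contra hNP
      have hp := Nat.minFac_prime (n := m.toNat) (by omega)
      have hd : m.toNat.minFac ∣ m.toNat := Nat.minFac_dvd _
      have hsq : m.toNat.minFac * m.toNat.minFac ≤ m.toNat := by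
        simpa [Nat.pow_two] using Nat.minFac_sq_le_self (by omega) hNP
      have hle : m.toNat.minFac ≤ Nat.sqrt m.toNat := Nat.le_sqrt.mpr hsq
      have hne2 : m.toNat.minFac ≠ 2 := by
        intro h2
        apply hodd
        have : ((2:Nat) : Int) ∣ (m.toNat : Int) := by exact_mod_cast (h2 ▸ hd)
        rwa [hm0] at this
      rcases hp.eq_two_or_odd' with h' | h'
      · exact hne2 h'
      · have h2f := hp.two_le
        have h3f : 3 ≤ m.toNat.minFac := by omega
        refine h (m.toNat.minFac : Int) ?_ ?_
        · rw [PySem.List.mem_pyRange_iff_of_pos (by norm_num)]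
          obtain ⟨c, hc⟩ := h'
          refine ⟨by exact_mod_cast h3f, by exact_mod_cast Nat.lt_succ_of_le hle, ?_⟩
          exact ⟨(c:Int) - 1, by push_cast [hc]; ring⟩
        · rw [← hm0]; exact_mod_cast hd
    · intro hp d hd hdvd
      rw [PySem.List.mem_pyRange_iff_of_pos (by norm_num)] at hd
      have hdn : d.toNat ∣ m.toNat := by
        have : (d.toNat : Int) ∣ (m.toNat : Int) := by
          rw [hm0, Int.toNat_of_nonneg (by omega)]
          exact hdvd
        exact_mod_cast this
      rcases Nat.Prime.eq_one_or_self_of_dvd hp _ hdn with h' | h'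
      · omega
      · have hlt : Nat.sqrt m.toNat < m.toNat := Nat.sqrt_lt_self (by omega)
        omega

-- ---- _has_prime_factor ----

theorem hasPrimeFactor_true_exists {x : Int} {ps : List Int}
    (h : hasPrimeFactor x ps = true) : ∃ p ∈ ps, p * p ≤ x ∧ PySem.Int.mod x p = 0 := by
  induction ps with
  | nil => simp [hasPrimeFactor] at h
  | cons p ps ih =>
    rw [hasPrimeFactor] at h
    by_cases h1 : p * p > x
    · simp [h1] at h
    · rw [if_neg h1] at h
      by_cases h2 : PySem.Int.mod x p == 0
      · exact ⟨p, List.mem_cons_self, by omega, by simpa using h2⟩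
      · rw [if_neg h2] at h
        obtain ⟨q, hq, hqx, hqd⟩ := ih h
        exact ⟨q, List.mem_cons_of_mem _ hq, hqx, hqd⟩

theorem hasPrimeFactor_false_of_prime {x : Int} {ps : List Int}
    (hall : ∀ p ∈ ps, 2 ≤ p) (hx : 2 ≤ x) (hp : Nat.Prime x.toNat) :
    hasPrimeFactor x ps = false := by
  induction ps with
  | nil => rfl
  | cons p ps ih =>
    rw [hasPrimeFactor]
    by_cases h1 : p * p > x
    · simp [h1]
    · rw [if_neg h1]
      have hp2 : 2 ≤ p := hall p List.mem_cons_self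
      have hnd : ¬ (PySem.Int.mod x p == 0) := by
        simp only [beq_iff_eq, PySem.Int.mod_eq_zero_iff_dvd]
        intro hdvd
        have hdn : p.toNat ∣ x.toNat := by
          have : (p.toNat : Int) ∣ (x.toNat : Int) := by
            rw [Int.toNat_of_nonneg (by omega), Int.toNat_of_nonneg (by omega)]
            exact hdvd
          exact_mod_cast this
        rcases Nat.Prime.eq_one_or_self_of_dvd hp _ hdn with h' | h'
        · omega
        · have hpx : p = x := by omega
          nlinarith
      rw [if_neg hnd]
      exact ih (fun q hq => hall q (List.mem_cons_of_mem _ hq))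

theorem hasPrimeFactor_true_of_mem {x q : Int} {ps : List Int}
    (hsort : ps.Pairwise (· < ·)) (hall : ∀ p ∈ ps, 2 ≤ p) (hq : q ∈ ps)
    (hqx : q * q ≤ x) (hdvd : PySem.Int.mod x q = 0) :
    hasPrimeFactor x ps = true := by
  induction ps with
  | nil => simp at hq
  | cons p ps ih =>
    rw [hasPrimeFactor]
    have hp2 : 2 ≤ p := hall p List.mem_cons_self
    rcases List.mem_cons.mp hq with rfl | hq'
    · rw [if_neg (by omega), if_pos (by simpa using hdvd)]
    · have hpq : p < q := (List.pairwise_cons.mp hsort).1 q hq'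
      have hppx : p * p ≤ x := by nlinarith
      rw [if_neg (by omega)]
      by_cases h2 : PySem.Int.mod x p == 0
      · rw [if_pos h2]
      · rw [if_neg h2]
        exact ih (List.pairwise_cons.mp hsort).2
          (fun r hr => hall r (List.mem_cons_of_mem _ hr)) hq'

-- ---- the invariant of Source B's prime-table loop ----

def spInv (j : Int) (ps : List Int) : Prop :=
  (∀ p ∈ ps, 2 ≤ p ∧ p < j) ∧ ps.Pairwise (· < ·) ∧
    ∀ q : Int, 2 ≤ q → q < j → Nat.Prime q.toNat → q ∈ ps

theorem spInv_step {j : Int} {ps : List Int} (h : spInv j ps) (h2 : 2 ≤ j) :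
    spInv (j + 1) (if !hasPrimeFactor j ps then ps ++ [j] else ps) := by
  obtain ⟨hb, hsort, hcomp⟩ := h
  by_cases hf : hasPrimeFactor j ps = true
  · rw [hf]
    simp only [Bool.not_true, Bool.false_eq_true, if_false]
    refine ⟨fun p hp => ⟨(hb p hp).1, by have := (hb p hp).2; omega⟩, hsort, ?_⟩
    intro q hq2 hqj hqp
    rcases lt_or_eq_of_le (show q ≤ j by omega) with h' | rfl
    · exact hcomp q hq2 h' hqp
    · exfalso
      obtain ⟨p, hpmem, hppq, hpd⟩ := hasPrimeFactor_true_exists hf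
      have hp2 := (hb p hpmem).1
      have hpj := (hb p hpmem).2
      have hdvd : p ∣ q := (PySem.Int.mod_eq_zero_iff_dvd _ _).mp hpd
      have hdn : p.toNat ∣ q.toNat := by
        have : (p.toNat : Int) ∣ (q.toNat : Int) := by
          rw [Int.toNat_of_nonneg (by omega), Int.toNat_of_nonneg (by omega)]
          exact hdvd
        exact_mod_cast this
      rcases Nat.Prime.eq_one_or_self_of_dvd hqp _ hdn with h' | h' <;> omega
  · rw [Bool.not_eq_true] at hf
    rw [hf]
    simp only [Bool.not_false, if_true]
    refine ⟨?_, ?_, ?_⟩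
    · intro p hp
      rcases List.mem_append.mp hp with h' | h'
      · exact ⟨(hb p h').1, by have := (hb p h').2; omega⟩
      · simp at h'
        omega
    · rw [List.pairwise_append]
      exact ⟨hsort, List.pairwise_singleton _ _,
        fun p hp q hq => by simp at hq; subst hq; exact (hb p hp).2⟩
    · intro q hq2 hqj hqp
      rcases lt_or_eq_of_le (show q ≤ j by omega) with h' | rfl
      · exact List.mem_append_left _ (hcomp q hq2 h' hqp)
      · exact List.mem_append_right _ (by simp)

theorem smallPrimes_inv (lim : Int) : spInv (lim + 1) (smallPrimes lim) := by
  unfold smallPrimes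
  by_cases hl : lim < 2
  · have hnil : PySem.List.pyRange 2 (lim + 1) 1 = [] :=
      List.eq_nil_iff_forall_not_mem.mpr
        (fun y hy => by rw [PySem.List.mem_pyRange_one] at hy; omega)
    rw [hnil]
    exact ⟨by simp, by simp, fun q hq2 hqj _ => by omega⟩
  · -- lim ≥ 2: induct on how far the range extends
    have key : ∀ k : Nat, spInv (2 + k)
        ((PySem.List.pyRange 2 (2 + (k : Int)) 1).foldl
          (fun ps p => if !hasPrimeFactor p ps then ps ++ [p] else ps) []) := by
      intro k
      induction k with
      | zero =>
        have hnil : PySem.List.pyRange 2 (2 + (0:Nat) : Int) 1 = [] :=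
          List.eq_nil_iff_forall_not_mem.mpr
            (fun y hy => by rw [PySem.List.mem_pyRange_one] at hy; omega)
        rw [hnil]
        exact ⟨by simp, by simp, fun q hq2 hqj _ => by omega⟩
      | succ k ih =>
        have hsplit : PySem.List.pyRange 2 (2 + ((k:Int) + 1)) 1 =
            PySem.List.pyRange 2 (2 + (k:Int)) 1 ++ [2 + (k:Int)] := by
          have := PySem.List.pyRange_one_succ_right (a := 2) (b := 2 + (k:Int)) (by omega)
          simpa [add_assoc] using this
        push_cast
        rw [hsplit, List.foldl_append]
        simp only [List.foldl_cons, List.foldl_nil]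
        have := spInv_step ih (by omega)
        simpa [add_assoc, add_comm, add_left_comm] using this
    have hk := key (lim - 1).toNat
    have : 2 + ((lim - 1).toNat : Int) = lim + 1 := by omega
    rw [this] at hk
    exact hk

-- ---- the reversal of an odd x ≥ 13 is at least 10 ----

theorem pyRev_ge_ten {x : Int} (h13 : 13 ≤ x) (hodd : ¬ (2:Int) ∣ x) : 10 ≤ pyRev x := by
  unfold pyRev
  set m := x.toNat with hm
  have hm13 : 13 ≤ m := by omega
  have hmodd : m % 2 = 1 := by
    rcases Nat.even_or_odd m with he | ho
    · exfalso
      apply hodd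
      obtain ⟨c, hc⟩ := he
      exact ⟨(c : Int), by omega⟩
    · omega
  have hdig : Nat.digits 10 m = m % 10 :: Nat.digits 10 (m / 10) := by
    rw [Nat.digits_def' (by norm_num : (1:ℕ) < 10) (by omega)]
  rw [hdig, List.reverse_cons, Nat.ofDigits_append]
  have hlast : Nat.ofDigits 10 [m % 10] = m % 10 := by
    simp [Nat.ofDigits]
  rw [hlast]
  have hlen : 1 ≤ ((Nat.digits 10 (m / 10)).reverse).length := by
    rw [List.length_reverse]
    have : Nat.digits 10 (m / 10) ≠ [] :=
      Nat.digits_ne_nil_iff_ne_zero.mpr (by omega)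
    cases h : Nat.digits 10 (m / 10) with
    | nil => exact absurd h this
    | cons a l => simp
  have hd1 : 1 ≤ m % 10 := by
    have := Nat.mod_mod_of_dvd m (by norm_num : 2 ∣ 10)
    omega
  have hpow : (10:ℕ) ^ ((Nat.digits 10 (m / 10)).reverse).length ≥ 10 := by
    calc (10:ℕ) ^ ((Nat.digits 10 (m / 10)).reverse).length ≥ 10 ^ 1 :=
      Nat.pow_le_pow_right (by norm_num) hlen
    _ = 10 := by norm_num
  have : 10 ≤ Nat.ofDigits 10 ((Nat.digits 10 (m / 10)).reverse) +
      10 ^ ((Nat.digits 10 (m / 10)).reverse).length * (m % 10) := by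
    have := Nat.le_mul_of_pos_right (10 ^ ((Nat.digits 10 (m / 10)).reverse).length) (by omega : 0 < m % 10)
    omega
  exact_mod_cast this

-- ---- the two loop bodies agree on every x of the range ----

theorem step_eq {n x : Int} (h13 : 13 ≤ x) (hxn : x < n + 1) (acc : Int × Int × Int) :
    emirpStepA acc x = emirpStepB (smallPrimes ((Nat.sqrt n.toNat : ℕ) : Int)) acc x := by
  have inv := smallPrimes_inv ((Nat.sqrt n.toNat : ℕ) : Int)
  set ps := smallPrimes ((Nat.sqrt n.toNat : ℕ) : Int) with hps
  unfold emirpStepA emirpStepB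
  by_cases hp : Nat.Prime x.toNat
  · have hA : isPrimeA x = true := (isPrimeA_iff (by omega)).mpr hp
    have h2x : ¬ (2:Int) ∣ x := by
      intro hd
      have hdn : (2:ℕ) ∣ x.toNat := by
        have : ((2:ℕ) : Int) ∣ (x.toNat : Int) := by
          rw [Int.toNat_of_nonneg (by omega : (0:Int) ≤ x)]
          exact_mod_cast hd
        exact_mod_cast this
      rcases hp.eq_one_or_self_of_dvd 2 hdn with h' | h' <;> omega
    have hHF : hasPrimeFactor x ps = false :=
      hasPrimeFactor_false_of_prime (fun p hq => (inv.1 p hq).1) (by omega) hp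
    have hmod : (PySem.Int.mod x 10 != 0) = true := by
      simp only [bne_iff_ne, ne_eq, PySem.Int.mod_eq_zero_iff_dvd]
      exact fun h10 => h2x (dvd_trans ⟨5, by norm_num⟩ h10)
    have hrev := pyRev_ge_ten h13 h2x
    have hAB : isPrimeA (pyRev x) = isPrimeB (pyRev x) := by
      rw [Bool.eq_iff_iff, isPrimeA_iff (by omega), isPrimeB_iff (by omega)]
    rw [hHF]
    simp only [Bool.false_eq_true, if_false, hA, hmod, hAB, Bool.true_and, Bool.and_true]
    by_cases hr : pyRev x = x
    · simp [hr]
    · simp [hr, Ne.symm hr]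
  · have hA : isPrimeA x = false := by
      rw [Bool.eq_false_iff, ne_eq, isPrimeA_iff (by omega)]
      exact hp
    have hHF : hasPrimeFactor x ps = true := by
      have hq := Nat.minFac_prime (n := x.toNat) (by omega)
      have hqd : x.toNat.minFac ∣ x.toNat := Nat.minFac_dvd _
      have hsq : x.toNat.minFac * x.toNat.minFac ≤ x.toNat := by
        simpa [Nat.pow_two] using Nat.minFac_sq_le_self (by omega) hp
      have hle : x.toNat.minFac ≤ Nat.sqrt x.toNat := Nat.le_sqrt.mpr hsq
      have hmono : Nat.sqrt x.toNat ≤ Nat.sqrt n.toNat := Nat.sqrt_le_sqrt (by omega)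
      refine hasPrimeFactor_true_of_mem inv.2.1 (fun p hq' => (inv.1 p hq').1)
        (inv.2.2 (x.toNat.minFac : Int) (by exact_mod_cast hq.two_le)
          (by exact_mod_cast Nat.lt_succ_of_le (le_trans hle hmono))
          (by simpa using hq)) ?_ ?_
      · have : ((x.toNat.minFac * x.toNat.minFac : ℕ) : Int) ≤ ((x.toNat : ℕ) : Int) := by
          exact_mod_cast hsq
        push_cast at this
        omega
      · rw [PySem.Int.mod_eq_zero_iff_dvd]
        have : ((x.toNat.minFac : ℕ) : Int) ∣ ((x.toNat : ℕ) : Int) := by exact_mod_cast hqd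
        rwa [Int.toNat_of_nonneg (by omega : (0:Int) ≤ x)] at this
    rw [hHF]
    simp [hA]

-- ===== VERDICT (by name: the statement is the Claim_ definition above) =====
theorem find_emirp_spec : Claim_equal_find_emirp := by
  intro n _
  unfold Spec_find_emirp find_emirp find_emirp_alt
  by_cases hn : n < 13
  · rw [if_pos hn]
    have hnil : PySem.List.pyRange 13 (n + 1) 1 = [] :=
      List.eq_nil_iff_forall_not_mem.mpr
        (fun y hy => by rw [PySem.List.mem_pyRange_one] at hy; omega)
    simp [hnil]
  · rw [if_neg hn]
    have hfold := PySem.List.foldl_congr_mem (PySem.List.pyRange 13 (n + 1) 1)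
      emirpStepA (emirpStepB (smallPrimes ((Nat.sqrt n.toNat : ℕ) : Int))) (0, 0, 0)
      (by
        intro acc x hx
        rw [PySem.List.mem_pyRange_one] at hx
        exact step_eq hx.1 hx.2 acc)
    simp only [hfold]
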